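-- pv_equiv track=rewrite | github.com/cloudQuant/backtrader_web | src/backend/app/utils/validation.py | detect_command_injection
-- ===== SOURCE A (Python) =====
-- DANGEROUS_COMMAND_CHARS = [';', '|', '&', '$', '`', '(', ')', '<', '>', '\n', '\r']
--
-- DANGEROUS_COMMANDS = [
--     'curl', 'wget', 'nc', 'netcat', 'telnet', 'ssh',
--     'eval', 'exec', 'system', 'passthru', 'shell_exec',
--     'ping', 'chmod', 'chown', 'rm', 'mv', 'cp',
-- ]
--
-- def detect_command_injection(value: str) -> bool:
--     """Detect potential command injection attack.
--
--     Args: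
--         value: The string value to check.
--
--     Returns:
--         True if command injection is detected, False otherwise.
--     """
--     if not isinstance(value, str):
--         return False
--
--     # Check for dangerous characters
--     for char in DANGEROUS_COMMAND_CHARS:
--         if char in value:
--             return True
--
--     # Check for dangerous commands
--     value_lower = value.lower()
--     for cmd in DANGEROUS_COMMANDS:
--         if cmd in value_lower:
--             return True
--
--     return False
-- ===== SOURCE B (Python) =====
-- _DANGEROUS_CHARS = frozenset(';|&$`()<>\n\r')
-- _DANGEROUS_CMDS = ('curl', 'wget', 'nc', 'netcat', 'telnet', 'ssh',
--                    'eval', 'exec', 'system', 'passthru', 'shell_exec',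
--                    'ping', 'chmod', 'chown', 'rm', 'mv', 'cp')
--
--
-- def detect_command_injection(value):
--     if not isinstance(value, str):
--         return False
--     low = value.lower()
--     for i in range(len(low)):
--         if low[i] in _DANGEROUS_CHARS or any(low.startswith(cmd, i) for cmd in _DANGEROUS_CMDS):
--             return True
--     return False
-- ===== Notes on version B (the rewrite author's own statement) =====
-- stated objective: alternative
-- what changed: Replaces A's 28 separate whole-string substring scans (one per dangerous char/command) with a single left-to-right pass over the lowercased string that at each position checks the character against a set and the suffix against the command words.
import Mathlib
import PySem

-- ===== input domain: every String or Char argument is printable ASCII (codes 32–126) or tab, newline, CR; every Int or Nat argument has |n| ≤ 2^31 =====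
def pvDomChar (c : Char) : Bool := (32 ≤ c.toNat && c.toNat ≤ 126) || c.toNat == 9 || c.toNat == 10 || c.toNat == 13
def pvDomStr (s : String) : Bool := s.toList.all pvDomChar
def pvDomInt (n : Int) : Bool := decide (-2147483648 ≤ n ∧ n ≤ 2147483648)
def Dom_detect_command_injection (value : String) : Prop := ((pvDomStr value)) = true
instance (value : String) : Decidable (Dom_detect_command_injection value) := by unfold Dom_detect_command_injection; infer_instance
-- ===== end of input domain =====

-- B replaces A's per-pattern whole-string substring scans by one left-to-right pass over the
-- lowercased string, checking each position against the char set and the command words (alternative).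

-- ===== PORT A =====
def pvDangerousCommandChars : List String := [";", "|", "&", "$", "`", "(", ")", "<", ">", "\n", "\r"]

def pvDangerousCommands : List String :=
  ["curl", "wget", "nc", "netcat", "telnet", "ssh",
   "eval", "exec", "system", "passthru", "shell_exec",
   "ping", "chmod", "chown", "rm", "mv", "cp"]

def detect_command_injection (value : String) : Bool :=
  -- for char in DANGEROUS_COMMAND_CHARS: if char in value: return True
  if pvDangerousCommandChars.any (fun ch => PySem.Str.isIn ch value) then true
  else
    -- value_lower = value.lower(); for cmd in DANGEROUS_COMMANDS: if cmd in value_lower: return True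
    let value_lower := PySem.Str.lower value
    if pvDangerousCommands.any (fun cmd => PySem.Str.isIn cmd value_lower) then true
    else false

-- ===== PORT B =====
def pvAltChars : List Char := [';', '|', '&', '$', '`', '(', ')', '<', '>', '\n', '\r']

def pvAltCmds : List (List Char) :=
  ["curl".toList, "wget".toList, "nc".toList, "netcat".toList, "telnet".toList, "ssh".toList,
   "eval".toList, "exec".toList, "system".toList, "passthru".toList, "shell_exec".toList,
   "ping".toList, "chmod".toList, "chown".toList, "rm".toList, "mv".toList, "cp".toList]

-- the 'for i in range(len(low))' loop of Source B, as recursion over the suffixes of low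
def pvAltScan : List Char → Bool
  | [] => false
  | c :: rest =>
    (pvAltChars.contains c || pvAltCmds.any (fun cmd => cmd.isPrefixOf (c :: rest))) || pvAltScan rest

def detect_command_injection_alt (value : String) : Bool :=
  pvAltScan (PySem.Chars.lower value.toList)

-- ===== PRECONDITION & SPEC =====
def Spec_detect_command_injection (value : String) (out : Bool) : Prop := out = detect_command_injection_alt value
instance (value : String) (out : Bool) : Decidable (Spec_detect_command_injection value out) := by unfold Spec_detect_command_injection; infer_instance

-- ===== CLAIM (what is proved, stated in full; the proofs are below) =====
def Claim_equal_detect_command_injection : Prop := ∀ (value : String), Dom_detect_command_injection value → Spec_detect_command_injection value (detect_command_injection value)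

-- ===== LEMMAS AND PROOFS =====

theorem pvSingleton_infix (c : Char) (l : List Char) : [c] <:+: l ↔ c ∈ l := by
  induction l with
  | nil => simp
  | cons a t ih => simp [List.infix_cons_iff, List.cons_prefix_cons, ih]

theorem pvLowerChar_eq_iff (x d : Char)
    (hx : x.toNat < 65 ∨ (90 < x.toNat ∧ x.toNat < 97) ∨ 122 < x.toNat) :
    PySem.Chars.lowerChar d = x ↔ d = x := by
  unfold PySem.Chars.lowerChar PySem.Chars.isupper
  split_ifs with h
  · simp only [Bool.and_eq_true, decide_eq_true_eq] at h
    obtain ⟨ha, hb⟩ := h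
    rw [Char.le_def, UInt32.le_iff_toNat_le] at ha hb
    have h1 : 65 ≤ d.toNat ∧ d.toNat ≤ 90 := ⟨ha, hb⟩
    constructor
    · intro he
      have h2 := congrArg Char.toNat he
      have hv : (Char.ofNat (d.toNat + 32)).toNat = d.toNat + 32 := by
        have hvalid : Nat.isValidChar (d.toNat + 32) := Or.inl (by omega)
        unfold Char.ofNat
        rw [dif_pos hvalid]
        exact Char.toNat_ofNatAux hvalid
      omega
    · intro he
      subst he
      omega
  · constructor <;> (intro he; exact he)

theorem pvMem_lower (x : Char) (hx : x.toNat < 65 ∨ (90 < x.toNat ∧ x.toNat < 97) ∨ 122 < x.toNat)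
    (l : List Char) : x ∈ PySem.Chars.lower l ↔ x ∈ l := by
  unfold PySem.Chars.lower
  simp only [List.mem_map]
  constructor
  · rintro ⟨d, hd, hdx⟩
    rw [pvLowerChar_eq_iff x d hx] at hdx
    exact hdx ▸ hd
  · intro hxl
    exact ⟨x, hxl, (pvLowerChar_eq_iff x x hx).mpr rfl⟩

theorem pvScan_iff (l : List Char) :
    pvAltScan l = true ↔
      ((∃ c ∈ l, c ∈ pvAltChars) ∨ (∃ cmd ∈ pvAltCmds, cmd <:+: l)) := by
  induction l with
  | nil =>
    simp only [pvAltScan, List.not_mem_nil, List.infix_nil]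
    constructor
    · intro h; exact absurd h (by decide)
    · rintro (⟨c, hc, _⟩ | ⟨cmd, hcmd, hnil⟩)
      · exact hc.elim
      · subst hnil; exact absurd hcmd (by decide)
  | cons a t ih =>
    simp only [pvAltScan, Bool.or_eq_true, List.contains_eq_mem, decide_eq_true_eq,
      List.any_eq_true, List.isPrefixOf_iff_prefix, ih, List.mem_cons, List.infix_cons_iff]
    constructor
    · rintro ((hc | ⟨cmd, hcmd, hp⟩) | (⟨c, hc, hcs⟩ | ⟨cmd, hcmd, hi⟩))
      · exact Or.inl ⟨a, Or.inl rfl, hc⟩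
      · exact Or.inr ⟨cmd, hcmd, Or.inl hp⟩
      · exact Or.inl ⟨c, Or.inr hc, hcs⟩
      · exact Or.inr ⟨cmd, hcmd, Or.inr hi⟩
    · rintro (⟨c, (rfl | hc), hcs⟩ | ⟨cmd, hcmd, (hp | hi)⟩)
      · exact Or.inl (Or.inl hcs)
      · exact Or.inr (Or.inl ⟨c, hc, hcs⟩)
      · exact Or.inl (Or.inr ⟨cmd, hcmd, hp⟩)
      · exact Or.inr (Or.inr ⟨cmd, hcmd, hi⟩)

theorem pvA_iff (value : String) :
    detect_command_injection value = true ↔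
      ((∃ c ∈ pvAltChars, c ∈ value.toList) ∨
       (∃ cmd ∈ pvAltCmds, cmd <:+: PySem.Chars.lower value.toList)) := by
  have hA : detect_command_injection value =
      (pvDangerousCommandChars.any (fun ch => PySem.Str.isIn ch value) ||
       pvDangerousCommands.any (fun cmd => PySem.Str.isIn cmd (PySem.Str.lower value))) := by
    unfold detect_command_injection
    cases hc : pvDangerousCommandChars.any (fun ch => PySem.Str.isIn ch value) <;>
      cases hd : pvDangerousCommands.any (fun cmd => PySem.Str.isIn cmd (PySem.Str.lower value)) <;>
        simp only [PySem.Str.isIn_eq, PySem.Str.toList_lower] at hc hd <;>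
        simp [PySem.Str.isIn_eq, PySem.Str.toList_lower, hc, hd]
  rw [hA]
  simp only [Bool.or_eq_true, List.any_eq_true, PySem.Str.isIn_iff_infix,
    PySem.Str.toList_lower, pvDangerousCommandChars, pvDangerousCommands, pvAltChars, pvAltCmds,
    List.mem_cons, List.not_mem_nil, or_false]
  constructor
  · rintro (⟨ch, hch, hin⟩ | ⟨cmd, hcmd, hin⟩)
    · rcases hch with rfl|rfl|rfl|rfl|rfl|rfl|rfl|rfl|rfl|rfl|rfl <;>
        exact Or.inl ⟨_, by decide, (pvSingleton_infix _ _).mp hin⟩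
    · rcases hcmd with rfl|rfl|rfl|rfl|rfl|rfl|rfl|rfl|rfl|rfl|rfl|rfl|rfl|rfl|rfl|rfl|rfl <;>
        exact Or.inr ⟨_, by decide, hin⟩
  · rintro (⟨c, hc, hin⟩ | ⟨cmd, hcmd, hin⟩)
    · rcases hc with rfl|rfl|rfl|rfl|rfl|rfl|rfl|rfl|rfl|rfl|rfl
      · exact Or.inl ⟨";", by decide, (pvSingleton_infix _ _).mpr hin⟩
      · exact Or.inl ⟨"|", by decide, (pvSingleton_infix _ _).mpr hin⟩
      · exact Or.inl ⟨"&", by decide, (pvSingleton_infix _ _).mpr hin⟩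
      · exact Or.inl ⟨"$", by decide, (pvSingleton_infix _ _).mpr hin⟩
      · exact Or.inl ⟨"`", by decide, (pvSingleton_infix _ _).mpr hin⟩
      · exact Or.inl ⟨"(", by decide, (pvSingleton_infix _ _).mpr hin⟩
      · exact Or.inl ⟨")", by decide, (pvSingleton_infix _ _).mpr hin⟩
      · exact Or.inl ⟨"<", by decide, (pvSingleton_infix _ _).mpr hin⟩
      · exact Or.inl ⟨">", by decide, (pvSingleton_infix _ _).mpr hin⟩
      · exact Or.inl ⟨"\n", by decide, (pvSingleton_infix _ _).mpr hin⟩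
      · exact Or.inl ⟨"\r", by decide, (pvSingleton_infix _ _).mpr hin⟩
    · rcases hcmd with rfl|rfl|rfl|rfl|rfl|rfl|rfl|rfl|rfl|rfl|rfl|rfl|rfl|rfl|rfl|rfl|rfl
      · exact Or.inr ⟨"curl", by decide, hin⟩
      · exact Or.inr ⟨"wget", by decide, hin⟩
      · exact Or.inr ⟨"nc", by decide, hin⟩
      · exact Or.inr ⟨"netcat", by decide, hin⟩
      · exact Or.inr ⟨"telnet", by decide, hin⟩
      · exact Or.inr ⟨"ssh", by decide, hin⟩
      · exact Or.inr ⟨"eval", by decide, hin⟩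
      · exact Or.inr ⟨"exec", by decide, hin⟩
      · exact Or.inr ⟨"system", by decide, hin⟩
      · exact Or.inr ⟨"passthru", by decide, hin⟩
      · exact Or.inr ⟨"shell_exec", by decide, hin⟩
      · exact Or.inr ⟨"ping", by decide, hin⟩
      · exact Or.inr ⟨"chmod", by decide, hin⟩
      · exact Or.inr ⟨"chown", by decide, hin⟩
      · exact Or.inr ⟨"rm", by decide, hin⟩
      · exact Or.inr ⟨"mv", by decide, hin⟩
      · exact Or.inr ⟨"cp", by decide, hin⟩

-- ===== VERDICT (by name: the statement is the Claim_ definition above) =====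
theorem detect_command_injection_spec : Claim_equal_detect_command_injection := by
  intro value _
  unfold Spec_detect_command_injection
  rw [Bool.eq_iff_iff]
  rw [pvA_iff]
  unfold detect_command_injection_alt
  rw [pvScan_iff]
  constructor
  · rintro (⟨c, hc, hin⟩ | h)
    · refine Or.inl ⟨c, ?_, hc⟩
      rw [pvMem_lower c ?_ value.toList]
      · exact hin
      · fin_cases hc <;> simp
    · exact Or.inr h
  · rintro (⟨c, hc, hcs⟩ | h)
    · refine Or.inl ⟨c, hcs, ?_⟩
      rw [pvMem_lower c ?_ value.toList] at hc
      · exact hc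
      · fin_cases hcs <;> simp
    · exact Or.inr h
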